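-- pv_equiv track=rewrite | github.com/zackdever/advent-of-code | 2019/aoc/day10_monitoring_station.py | asteroid_map_to_coords
-- ===== SOURCE A (Python) =====
-- def asteroid_map_to_coords(asteroid_map):
--     """
--     Takes a string/ascii art asteroid map
--     and returns a sorted list of coordinates.
--     """
--     asteroid_coords = []
--     y = 0
--     for line in asteroid_map.strip().split('\n'):
--         x = 0
--         for ch in line:
--             if ch == '#':
--                 asteroid_coords.append((x, y))
--             x += 1
--         y += 1
--     return sorted(asteroid_coords)
-- ===== SOURCE B (Python) =====
-- def asteroid_map_to_coords(asteroid_map):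
--     """Column-major scan: emit coordinates already in (x, y) order, no sort needed."""
--     lines = asteroid_map.strip().split('\n')
--     width = 0
--     for line in lines:
--         if len(line) > width:
--             width = len(line)
--     coords = []
--     for x in range(width):
--         for y, line in enumerate(lines):
--             if x < len(line) and line[x] == '#':
--                 coords.append((x, y))
--     return coords
-- ===== Notes on version B (the rewrite author's own statement) =====
-- stated objective: alternative
-- what changed: Scans the map column-major (x outer, y inner, guarding ragged lines with x < len(line)), emitting coordinates already in (x, y) order, so the sorted() call disappears.
import Mathlib
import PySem

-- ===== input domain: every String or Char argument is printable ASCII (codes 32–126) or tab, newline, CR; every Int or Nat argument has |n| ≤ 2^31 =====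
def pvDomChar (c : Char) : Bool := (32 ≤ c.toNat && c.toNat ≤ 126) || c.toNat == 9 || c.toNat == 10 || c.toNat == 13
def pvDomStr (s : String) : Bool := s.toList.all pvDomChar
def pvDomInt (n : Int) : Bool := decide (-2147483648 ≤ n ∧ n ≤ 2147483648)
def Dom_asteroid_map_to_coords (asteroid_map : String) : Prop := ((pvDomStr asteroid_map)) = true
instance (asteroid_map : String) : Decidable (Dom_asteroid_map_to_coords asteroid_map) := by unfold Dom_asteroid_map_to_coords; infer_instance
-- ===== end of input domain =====

-- B scans the map column-major (x outer, y inner, guarding ragged lines), emitting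
-- coordinates already in (x, y) order, so A's sorted() call disappears.

-- ===== PORT A =====
def asteroid_map_to_coords (asteroid_map : String) : List (Int × Int) :=
  let lines := PySem.Chars.splitOn (PySem.Chars.strip asteroid_map.toList) ['\n']
  let res := lines.foldl
    (fun (st : List (Int × Int) × Int) line =>
      let inner := line.foldl
        (fun (st2 : List (Int × Int) × Int) ch =>
          ((if ch = '#' then st2.1 ++ [(st2.2, st.2)] else st2.1), st2.2 + 1))
        (st.1, (0 : Int))
      (inner.1, st.2 + 1))
    (([] : List (Int × Int)), (0 : Int))
  PySem.List.sorted2 res.1 Prod.fst Prod.snd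

-- ===== PORT B =====
def asteroid_map_to_coords_alt (asteroid_map : String) : List (Int × Int) :=
  let lines := PySem.Chars.splitOn (PySem.Chars.strip asteroid_map.toList) ['\n']
  let width := lines.foldl
    (fun (w : Int) line => if PySem.Chars.len line > w then PySem.Chars.len line else w) 0
  (PySem.List.pyRange 0 width 1).foldl
    (fun acc x =>
      (PySem.List.enumerate lines 0).foldl
        (fun acc2 p =>
          if x < PySem.Chars.len p.2 ∧ PySem.Chars.pyGet? p.2 x = some '#'
          then acc2 ++ [(x, p.1)] else acc2)
        acc)
    []

-- ===== PRECONDITION & SPEC =====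
def Spec_asteroid_map_to_coords (asteroid_map : String) (out : List (Int × Int)) : Prop := out = asteroid_map_to_coords_alt asteroid_map
instance (asteroid_map : String) (out : List (Int × Int)) : Decidable (Spec_asteroid_map_to_coords asteroid_map out) := by unfold Spec_asteroid_map_to_coords; infer_instance

-- ===== CLAIM (what is proved, stated in full; the proofs are below) =====
def Claim_equal_asteroid_map_to_coords : Prop := ∀ (asteroid_map : String), Dom_asteroid_map_to_coords asteroid_map → Spec_asteroid_map_to_coords asteroid_map (asteroid_map_to_coords asteroid_map)

-- ===== LEMMAS AND PROOFS =====

-- the coordinates A's inner loop appends for row y over line l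
def pvRowChunk (y : Int) (l : List Char) : List (Int × Int) :=
  ((PySem.List.enumerate l 0).filter (fun q => q.2 == '#')).map (fun q => (q.1, y))

def pvRowRaw (lines : List (List Char)) : List (Int × Int) :=
  (PySem.List.enumerate lines 0).flatMap (fun p => pvRowChunk p.1 p.2)

-- the coordinates B's inner loop appends for column x
def pvColChunk (lines : List (List Char)) (x : Int) : List (Int × Int) :=
  ((PySem.List.enumerate lines 0).filter
    (fun p => decide (x < PySem.Chars.len p.2 ∧ PySem.Chars.pyGet? p.2 x = some '#'))).map
    (fun p => (x, p.1))

-- 'p is an asteroid position of the map'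
def pvMemP (lines : List (List Char)) (p : Int × Int) : Prop :=
  ∃ (yk : Nat) (hy : yk < lines.length) (xk : Nat) (hx : xk < (lines[yk]'hy).length),
    p = ((xk : Int), (yk : Int)) ∧ (lines[yk]'hy)[xk]'hx = '#'

-- A's inner loop characterised
theorem pvInnerA (l : List Char) (y : Int) (acc : List (Int × Int)) (s : Int) :
    l.foldl (fun (st2 : List (Int × Int) × Int) ch =>
        ((if ch = '#' then st2.1 ++ [(st2.2, y)] else st2.1), st2.2 + 1)) (acc, s)
      = (acc ++ ((PySem.List.enumerate l s).filter (fun q => q.2 == '#')).map (fun q => (q.1, y)),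
         s + l.length) := by
  induction l generalizing acc s with
  | nil => simp [PySem.List.enumerate_nil]
  | cons c t ih =>
      simp only [List.foldl_cons, PySem.List.enumerate_cons, List.filter_cons]
      by_cases h : c = '#'
      · simp [h, ih, List.length_cons]; omega
      · simp [h, ih, beq_iff_eq, List.length_cons]; omega

-- A's outer loop characterised
theorem pvOuterA (lines : List (List Char)) (acc : List (Int × Int)) (y : Int) :
    lines.foldl
      (fun (st : List (Int × Int) × Int) line =>
        let inner := line.foldl
          (fun (st2 : List (Int × Int) × Int) ch =>
            ((if ch = '#' then st2.1 ++ [(st2.2, st.2)] else st2.1), st2.2 + 1))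
          (st.1, (0 : Int))
        (inner.1, st.2 + 1)) (acc, y)
      = (acc ++ (PySem.List.enumerate lines y).flatMap (fun p => pvRowChunk p.1 p.2),
         y + lines.length) := by
  induction lines generalizing acc y with
  | nil => simp [PySem.List.enumerate_nil]
  | cons l t ih =>
      simp only [List.foldl_cons, PySem.List.enumerate_cons, List.flatMap_cons]
      rw [pvInnerA]
      simp [ih, pvRowChunk, List.length_cons]
      omega

-- B's loops characterised
theorem pvInnerB (lines : List (List Char)) (x : Int) (acc : List (Int × Int)) :
    (PySem.List.enumerate lines 0).foldl
      (fun acc2 p =>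
        if x < PySem.Chars.len p.2 ∧ PySem.Chars.pyGet? p.2 x = some '#'
        then acc2 ++ [(x, p.1)] else acc2) acc
      = acc ++ pvColChunk lines x := by
  rw [PySem.List.foldl_append_ite]; rfl

theorem pvOuterB (lines : List (List Char)) (width : Int) :
    (PySem.List.pyRange 0 width 1).foldl
      (fun acc x =>
        (PySem.List.enumerate lines 0).foldl
          (fun acc2 p =>
            if x < PySem.Chars.len p.2 ∧ PySem.Chars.pyGet? p.2 x = some '#'
            then acc2 ++ [(x, p.1)] else acc2) acc) []
      = (PySem.List.pyRange 0 width 1).flatMap (pvColChunk lines) := by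
  simp only [pvInnerB]
  rw [PySem.List.foldl_append_eq_flatMap]
  simp

-- the running maximum bounds every line length
theorem pvWidthBound (lines : List (List Char)) (w0 : Int) :
    w0 ≤ lines.foldl (fun (w : Int) line => if PySem.Chars.len line > w then PySem.Chars.len line else w) w0
    ∧ ∀ l ∈ lines, PySem.Chars.len l ≤ lines.foldl (fun (w : Int) line => if PySem.Chars.len line > w then PySem.Chars.len line else w) w0 := by
  induction lines generalizing w0 with
  | nil => simp
  | cons l t ih =>
      simp only [List.foldl_cons]
      rcases ih (if PySem.Chars.len l > w0 then PySem.Chars.len l else w0) with ⟨h1, h2⟩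
      refine ⟨?_, ?_⟩
      · refine le_trans ?_ h1; split_ifs with h <;> omega
      · intro l' hl'
        rcases List.mem_cons.mp hl' with rfl | hm
        · refine le_trans ?_ h1; split_ifs with h <;> omega
        · exact h2 l' hm

-- membership characterisations
theorem pvMemRow (lines : List (List Char)) (p : Int × Int) :
    p ∈ pvRowRaw lines ↔ pvMemP lines p := by
  unfold pvRowRaw pvRowChunk pvMemP
  rw [List.mem_flatMap]
  constructor
  · rintro ⟨q, hq, hp⟩
    rw [PySem.List.mem_enumerate_iff] at hq
    obtain ⟨yk, hy, rfl⟩ := hq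
    rw [List.mem_map] at hp
    obtain ⟨r, hr, rfl⟩ := hp
    rw [List.mem_filter] at hr
    obtain ⟨hr1, hr2⟩ := hr
    rw [PySem.List.mem_enumerate_iff] at hr1
    obtain ⟨xk, hx, rfl⟩ := hr1
    exact ⟨yk, hy, xk, hx, by simp, by simpa using hr2⟩
  · rintro ⟨yk, hy, xk, hx, rfl, hch⟩
    refine ⟨((yk : Int), lines[yk]), ?_, ?_⟩
    · rw [PySem.List.mem_enumerate_iff]; exact ⟨yk, hy, by simp⟩
    · rw [List.mem_map]
      refine ⟨((xk : Int), (lines[yk]'hy)[xk]'hx), ?_, by simp⟩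
      rw [List.mem_filter]
      refine ⟨?_, by simpa using hch⟩
      rw [PySem.List.mem_enumerate_iff]; exact ⟨xk, hx, by simp⟩

theorem pvMemCol (lines : List (List Char)) (width : Int)
    (hw : ∀ l ∈ lines, PySem.Chars.len l ≤ width) (p : Int × Int) :
    p ∈ (PySem.List.pyRange 0 width 1).flatMap (pvColChunk lines) ↔ pvMemP lines p := by
  rw [List.mem_flatMap]
  constructor
  · rintro ⟨x, hx, hp⟩
    unfold pvColChunk at hp
    rw [List.mem_map] at hp
    obtain ⟨q, hq, rfl⟩ := hp
    rw [List.mem_filter] at hq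
    obtain ⟨hq1, hq2⟩ := hq
    rw [PySem.List.mem_enumerate_iff] at hq1
    obtain ⟨yk, hy, rfl⟩ := hq1
    rw [decide_eq_true_eq] at hq2
    obtain ⟨hlt, hget⟩ := hq2
    rw [PySem.List.mem_pyRange_one] at hx
    obtain ⟨hx0, _⟩ := hx
    lift x to Nat using hx0 with xk
    simp only [PySem.Chars.pyGet?_eq_listPyGet?, PySem.List.pyGet?_natCast] at hget
    rw [List.getElem?_eq_some_iff] at hget
    obtain ⟨hxk, hch⟩ := hget
    exact ⟨yk, hy, xk, hxk, by simp, hch⟩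
  · rintro ⟨yk, hy, xk, hx, rfl, hch⟩
    have hmem : lines[yk]'hy ∈ lines := List.getElem_mem hy
    have hlen : PySem.Chars.len (lines[yk]'hy) = ((lines[yk]'hy).length : Int) := by
      simp [PySem.Chars.len_eq]
    refine ⟨(xk : Int), ?_, ?_⟩
    · rw [PySem.List.mem_pyRange_one]
      have := hw _ hmem
      constructor
      · positivity
      · have : ((lines[yk]'hy).length : Int) ≤ width := by rw [← hlen]; exact hw _ hmem
        omega
    · unfold pvColChunk
      rw [List.mem_map]
      refine ⟨((yk : Int), lines[yk]'hy), ?_, by simp⟩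
      rw [List.mem_filter]
      refine ⟨?_, ?_⟩
      · rw [PySem.List.mem_enumerate_iff]; exact ⟨yk, hy, by simp⟩
      · rw [decide_eq_true_eq]
        refine ⟨by rw [hlen]; exact_mod_cast hx, ?_⟩
        simp only [PySem.Chars.pyGet?_eq_listPyGet?, PySem.List.pyGet?_natCast]
        rw [List.getElem?_eq_some_iff]
        exact ⟨hx, hch⟩

-- every element of a row chunk has second component y; of a column chunk, first component x
theorem pvRowChunk_snd (y : Int) (l : List Char) (a : Int × Int) (ha : a ∈ pvRowChunk y l) :
    a.2 = y := by
  unfold pvRowChunk at ha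
  rw [List.mem_map] at ha
  obtain ⟨r, _, rfl⟩ := ha
  rfl

theorem pvColChunk_fst (lines : List (List Char)) (x : Int) (a : Int × Int)
    (ha : a ∈ pvColChunk lines x) : a.1 = x := by
  unfold pvColChunk at ha
  rw [List.mem_map] at ha
  obtain ⟨r, _, rfl⟩ := ha
  rfl

-- row-major order: strictly increasing in (y, x)
theorem pvRowPairwise (lines : List (List Char)) :
    (pvRowRaw lines).Pairwise (fun a b => a.2 < b.2 ∨ (a.2 = b.2 ∧ a.1 < b.1)) := by
  unfold pvRowRaw
  rw [List.pairwise_flatMap]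
  constructor
  · intro q _
    unfold pvRowChunk
    refine List.Pairwise.map _ ?_ ((PySem.List.pairwise_lt_enumerate _ _).filter _)
    intro a b hab
    exact Or.inr ⟨rfl, hab⟩
  · refine (PySem.List.pairwise_lt_enumerate _ _).imp ?_
    intro q1 q2 h a ha b hb
    rw [pvRowChunk_snd q1.1 q1.2 a ha, pvRowChunk_snd q2.1 q2.2 b hb]
    exact Or.inl h

theorem pvRowNodup (lines : List (List Char)) : (pvRowRaw lines).Nodup := by
  refine (pvRowPairwise lines).imp ?_
  intro a b h heq
  subst heq
  rcases h with h | ⟨_, h⟩ <;> exact lt_irrefl _ h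

-- column-major order: strictly increasing in (x, y)
theorem pvColPairwise (lines : List (List Char)) (width : Int) :
    ((PySem.List.pyRange 0 width 1).flatMap (pvColChunk lines)).Pairwise
      (fun a b => a.1 < b.1 ∨ (a.1 = b.1 ∧ a.2 < b.2)) := by
  rw [List.pairwise_flatMap]
  constructor
  · intro x _
    unfold pvColChunk
    refine List.Pairwise.map _ ?_ ((PySem.List.pairwise_lt_enumerate _ _).filter _)
    intro a b hab
    exact Or.inr ⟨rfl, hab⟩
  · refine (PySem.List.pairwise_lt_pyRange_one 0 width).imp ?_
    intro x1 x2 h a ha b hb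
    rw [pvColChunk_fst lines x1 a ha, pvColChunk_fst lines x2 b hb]
    exact Or.inl h

theorem pvColNodup (lines : List (List Char)) (width : Int) :
    ((PySem.List.pyRange 0 width 1).flatMap (pvColChunk lines)).Nodup := by
  refine (pvColPairwise lines width).imp ?_
  intro a b h heq
  subst heq
  rcases h with h | ⟨_, h⟩ <;> exact lt_irrefl _ h

-- Python's tuple sort with keys (fst, snd) is the sort by the lexicographic order
theorem pvSorted2Lex (xs : List (Int × Int)) :
    PySem.List.sorted2 xs Prod.fst Prod.snd
      = PySem.List.sorted xs (fun p => toLex p) := by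
  rw [PySem.List.sorted_eq_foldl_insertBy]
  have hfun : (fun (a b : Int × Int) => decide (a.1 < b.1) || (!decide (b.1 < a.1) && decide (a.2 < b.2)))
      = (fun (a b : Int × Int) => decide (toLex a < toLex b)) := by
    funext a b
    rw [Bool.eq_iff_iff]
    simp only [Bool.or_eq_true, Bool.and_eq_true, Bool.not_eq_true', decide_eq_true_eq,
      decide_eq_false_iff_not, Prod.Lex.toLex_lt_toLex]
    omega
  show xs.foldl (fun acc x => PySem.List.insertBy
      (fun a b => decide (a.1 < b.1) || (!decide (b.1 < a.1) && decide (a.2 < b.2))) x acc) []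
    = _
  rw [hfun]

-- the generic equivalence over the parsed lines
theorem pvMain (lines : List (List Char)) :
    PySem.List.sorted2
      (lines.foldl
        (fun (st : List (Int × Int) × Int) line =>
          let inner := line.foldl
            (fun (st2 : List (Int × Int) × Int) ch =>
              ((if ch = '#' then st2.1 ++ [(st2.2, st.2)] else st2.1), st2.2 + 1))
            (st.1, (0 : Int))
          (inner.1, st.2 + 1))
        (([] : List (Int × Int)), (0 : Int))).1 Prod.fst Prod.snd
    = (PySem.List.pyRange 0
        (lines.foldl (fun (w : Int) line => if PySem.Chars.len line > w then PySem.Chars.len line else w) 0) 1).foldl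
        (fun acc x =>
          (PySem.List.enumerate lines 0).foldl
            (fun acc2 p =>
              if x < PySem.Chars.len p.2 ∧ PySem.Chars.pyGet? p.2 x = some '#'
              then acc2 ++ [(x, p.1)] else acc2)
            acc)
        [] := by
  rw [pvOuterA, pvOuterB, pvSorted2Lex]
  simp only [List.nil_append]
  have hw := (pvWidthBound lines 0).2
  refine PySem.List.sorted_eq_of_perm_of_pairwise_lt _ _ _ ?_ ?_
  · refine (List.perm_ext_iff_of_nodup
      (pvColNodup lines _) (pvRowNodup lines)).mpr ?_
    intro a
    rw [pvMemCol lines _ hw, pvMemRow]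
  · refine (pvColPairwise lines _).imp ?_
    intro a b h
    rw [Prod.Lex.toLex_lt_toLex]
    exact h

-- ===== VERDICT (by name: the statement is the Claim_ definition above) =====
theorem asteroid_map_to_coords_spec : Claim_equal_asteroid_map_to_coords :=
  fun m _ => pvMain (PySem.Chars.splitOn (PySem.Chars.strip m.toList) ['\n'])
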